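-- pv_equiv track=rewrite | github.com/QuBenhao/LeetCode | problems/problems_1835/solution.py | getXORSum
-- ===== SOURCE A (Python) =====
-- def getXORSum(arr1, arr2):
--     """
--     :type arr1: List[int]
--     :type arr2: List[int]
--     :rtype: int
--     """
--     # (a1^a2) & (b1^b2) = (a1&b1) ^ (a1&b2) ^ (a2&b1) ^ (a2&b2)
--     n1, n2 = len(arr1), len(arr2)
--     ans = 0
--     for i in range(n1):
--         ans ^= arr1[i]
--     ans1 = 0
--     for j in range(n2):
--         ans1 ^= arr2[j]
--     return ans & ans1
-- ===== SOURCE B (Python) =====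
-- def getXORSum(arr1, arr2):
--     ans = 0
--     for a in arr1:
--         for b in arr2:
--             ans ^= a & b
--     return ans
-- ===== Notes on version B (the rewrite author's own statement) =====
-- stated objective: alternative
-- what changed: B computes the XOR of all pairwise ANDs directly with a nested loop over every pair, instead of A's factored form (xor-sum of arr1) & (xor-sum of arr2); they agree by distributivity of AND over XOR.
import Mathlib
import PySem

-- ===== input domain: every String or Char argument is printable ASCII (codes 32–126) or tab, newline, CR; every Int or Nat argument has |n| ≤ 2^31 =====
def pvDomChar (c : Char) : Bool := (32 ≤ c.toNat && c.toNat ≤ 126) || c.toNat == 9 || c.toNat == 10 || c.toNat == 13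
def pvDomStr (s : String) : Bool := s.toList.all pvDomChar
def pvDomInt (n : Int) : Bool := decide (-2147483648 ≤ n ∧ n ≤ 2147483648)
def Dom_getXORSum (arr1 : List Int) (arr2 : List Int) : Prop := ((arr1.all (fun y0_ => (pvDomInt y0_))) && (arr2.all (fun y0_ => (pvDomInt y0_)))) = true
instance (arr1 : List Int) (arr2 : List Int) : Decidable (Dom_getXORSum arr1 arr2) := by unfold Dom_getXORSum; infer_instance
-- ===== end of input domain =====

-- B replaces A's factored (xor-sum arr1) & (xor-sum arr2) by the direct nested-loop
-- XOR over all pairwise ANDs; equal by distributivity of AND over XOR (alternative, not faster).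


-- ===== PORT A =====
-- ans = xor over arr1[i], ans1 = xor over arr2[j], return ans & ans1
def getXORSum (arr1 : List Int) (arr2 : List Int) : Int :=
  let n1 : Int := arr1.length
  let n2 : Int := arr2.length
  let ans : Int := (PySem.List.pyRange 0 n1 1).foldl
    (fun ans i => PySem.Int.bxor ans (PySem.List.pyGetD arr1 i 0)) 0
  let ans1 : Int := (PySem.List.pyRange 0 n2 1).foldl
    (fun ans1 j => PySem.Int.bxor ans1 (PySem.List.pyGetD arr2 j 0)) 0
  PySem.Int.band ans ans1

-- ===== PORT B =====
-- ans = 0; for a in arr1: for b in arr2: ans ^= a & b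
def getXORSum_alt (arr1 : List Int) (arr2 : List Int) : Int :=
  arr1.foldl (fun ans a =>
    arr2.foldl (fun ans b => PySem.Int.bxor ans (PySem.Int.band a b)) ans) 0

-- ===== PRECONDITION & SPEC =====
def Spec_getXORSum (arr1 : List Int) (arr2 : List Int) (out : Int) : Prop := out = getXORSum_alt arr1 arr2
instance (arr1 : List Int) (arr2 : List Int) (out : Int) : Decidable (Spec_getXORSum arr1 arr2 out) := by unfold Spec_getXORSum; infer_instance

-- ===== CLAIM (what is proved, stated in full; the proofs are below) =====
def Claim_equal_getXORSum : Prop := ∀ (arr1 : List Int) (arr2 : List Int), Dom_getXORSum arr1 arr2 → Spec_getXORSum arr1 arr2 (getXORSum arr1 arr2)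

-- ===== LEMMAS AND PROOFS =====

theorem land_add_ldiff (m n : Nat) : (m &&& n) + m.ldiff n = m := by
  induction m using Nat.binaryRec generalizing n with
  | zero => simp [Nat.ldiff]
  | bit b m ih =>
    obtain ⟨c, k, rfl⟩ : ∃ c k, n = Nat.bit c k := ⟨n.bodd, n.div2, (Nat.bit_bodd_div2 n).symm⟩
    rw [Nat.land_bit, Nat.ldiff_bit]
    have := ih k
    cases b <;> cases c <;> simp [Nat.bit] <;> omega

theorem band_eq_land (a b : Int) : PySem.Int.band a b = Int.land a b := by
  cases a <;> cases b <;>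
    simp [PySem.Int.band, Int.land, Int.negSucc_eq] <;>
    (try omega) <;>
    (rename_i m p
     have h1 := land_add_ldiff m p
     have h2 := land_add_ldiff p m
     omega)

theorem bxor_eq_xor (a b : Int) : PySem.Int.bxor a b = Int.xor a b := by
  cases a <;> cases b <;>
    simp [PySem.Int.bxor, Int.xor, Int.negSucc_eq] <;>
    omega

theorem land_xor_distrib (a b c : Int) :
    Int.land a (Int.xor b c) = Int.xor (Int.land a b) (Int.land a c) := by
  cases a <;> cases b <;> cases c <;> simp [Int.land, Int.xor] <;>
    (apply Nat.eq_of_testBit_eq; intro i; rename_i m p q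
     simp only [Nat.testBit_ldiff, Nat.testBit_and, Nat.testBit_or, Nat.testBit_xor]
     cases m.testBit i <;> cases p.testBit i <;> cases q.testBit i <;> rfl)

theorem band_bxor_distrib (a b c : Int) :
    PySem.Int.band a (PySem.Int.bxor b c)
      = PySem.Int.bxor (PySem.Int.band a b) (PySem.Int.band a c) := by
  simp only [band_eq_land, bxor_eq_xor, land_xor_distrib]

theorem bxor_assoc (a b c : Int) :
    PySem.Int.bxor (PySem.Int.bxor a b) c = PySem.Int.bxor a (PySem.Int.bxor b c) := by
  simp only [bxor_eq_xor]
  cases a <;> cases b <;> cases c <;> simp [Int.xor] <;>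
    (apply Nat.eq_of_testBit_eq; intro i; rename_i m p q
     simp only [Nat.testBit_xor]
     cases m.testBit i <;> cases p.testBit i <;> cases q.testBit i <;> rfl)

-- xor-sum of a list, as A computes it
def xorSum (xs : List Int) : Int := xs.foldl PySem.Int.bxor 0

theorem foldl_bxor_shift (xs : List Int) (init : Int) :
    xs.foldl PySem.Int.bxor init = PySem.Int.bxor init (xorSum xs) := by
  induction xs generalizing init with
  | nil => simp [xorSum]
  | cons x t ih =>
    have h : xorSum (x :: t) = PySem.Int.bxor x (xorSum t) := by
      rw [xorSum, List.foldl_cons, ih]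
      congr 1
      rw [PySem.Int.bxor_comm]; simp
    rw [List.foldl_cons, ih, h, ← bxor_assoc]

theorem xorSum_cons (x : Int) (t : List Int) :
    xorSum (x :: t) = PySem.Int.bxor x (xorSum t) := by
  rw [xorSum, List.foldl_cons, foldl_bxor_shift]
  have h0 : PySem.Int.bxor 0 x = x := by rw [PySem.Int.bxor_comm]; simp
  rw [h0]

theorem inner_loop (a : Int) (arr2 : List Int) (acc : Int) :
    arr2.foldl (fun s b => PySem.Int.bxor s (PySem.Int.band a b)) acc
      = PySem.Int.bxor acc (PySem.Int.band a (xorSum arr2)) := by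
  induction arr2 generalizing acc with
  | nil => simp [xorSum]
  | cons b t ih =>
    rw [List.foldl_cons, ih, xorSum_cons, band_bxor_distrib, ← bxor_assoc]

theorem outer_loop (arr1 : List Int) (y acc : Int) :
    arr1.foldl (fun s a => PySem.Int.bxor s (PySem.Int.band a y)) acc
      = PySem.Int.bxor acc (PySem.Int.band (xorSum arr1) y) := by
  induction arr1 generalizing acc with
  | nil => simp [xorSum, PySem.Int.band_comm (a := 0)]
  | cons a t ih =>
    rw [List.foldl_cons, ih, xorSum_cons]
    rw [PySem.Int.band_comm (a := PySem.Int.bxor a (xorSum t)),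
        band_bxor_distrib, ← bxor_assoc,
        PySem.Int.band_comm (a := y) (b := a),
        PySem.Int.band_comm (a := y) (b := xorSum t)]

theorem foldl_index_eq (xs : List Int) :
    (PySem.List.pyRange 0 (xs.length : Int) 1).foldl
      (fun s i => PySem.Int.bxor s (PySem.List.pyGetD xs i 0)) 0 = xorSum xs := by
  have h := PySem.List.foldl_pyRange_pyGetD (a := 0) (xs := xs)
    (f := PySem.Int.bxor) (d := (0 : Int)) (init := (0 : Int)) (by omega)
  simpa [xorSum] using h

-- ===== VERDICT (by name: the statement is the Claim_ definition above) =====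
theorem getXORSum_spec : Claim_equal_getXORSum := by
  intro arr1 arr2 _
  show getXORSum arr1 arr2 = getXORSum_alt arr1 arr2
  unfold getXORSum getXORSum_alt
  simp only [foldl_index_eq]
  have : ∀ ans a, arr2.foldl (fun s b => PySem.Int.bxor s (PySem.Int.band a b)) ans
      = PySem.Int.bxor ans (PySem.Int.band a (xorSum arr2)) := fun ans a => inner_loop a arr2 ans
  calc PySem.Int.band (xorSum arr1) (xorSum arr2)
      = PySem.Int.bxor 0 (PySem.Int.band (xorSum arr1) (xorSum arr2)) := by
        rw [PySem.Int.bxor_comm]; simp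
    _ = arr1.foldl (fun s a => PySem.Int.bxor s (PySem.Int.band a (xorSum arr2))) 0 :=
        (outer_loop arr1 (xorSum arr2) 0).symm
    _ = arr1.foldl (fun ans a =>
          arr2.foldl (fun ans b => PySem.Int.bxor ans (PySem.Int.band a b)) ans) 0 := by
        have hf : (fun (ans a : Int) =>
              arr2.foldl (fun ans b => PySem.Int.bxor ans (PySem.Int.band a b)) ans)
            = fun s a => PySem.Int.bxor s (PySem.Int.band a (xorSum arr2)) := by
          funext s a; exact inner_loop a arr2 s
        rw [hf]
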